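-- pv_equiv track=rewrite | github.com/theflashhere/clara-pipeline | scripts/extract_memo.py | generate_account_id
-- ===== SOURCE A (Python) =====
-- def generate_account_id(company_name: str) -> str:
--     """Generate a stable slug from company name."""
--     slug = company_name.lower()
--     for ch in [" ", "&", "/", "\\", ".", ","]:
--         slug = slug.replace(ch, "-")
--     slug = "".join(c for c in slug if c.isalnum() or c == "-")
--     while "--" in slug:
--         slug = slug.replace("--", "-")
--     return slug.strip("-")
-- ===== SOURCE B (Python) =====
-- def generate_account_id(company_name: str) -> str:
--     """Generate a stable slug from company name (single pass)."""
--     out = []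
--     for c in company_name.lower():
--         if c in " &/\\.,":
--             d = "-"
--         elif c.isalnum() or c == "-":
--             d = c
--         else:
--             continue
--         if d == "-" and out and out[-1] == "-":
--             continue
--         out.append(d)
--     return "".join(out).strip("-")
-- ===== Notes on version B (the rewrite author's own statement) =====
-- stated objective: alternative
-- what changed: B replaces A's four phases (six whole-string replace passes, a filter pass, a repeated double-dash collapse loop, then strip) by one single pass over the lowered string that classifies each character and emits a dash only when the last emitted character was not a dash, then strips.
import Mathlib
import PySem

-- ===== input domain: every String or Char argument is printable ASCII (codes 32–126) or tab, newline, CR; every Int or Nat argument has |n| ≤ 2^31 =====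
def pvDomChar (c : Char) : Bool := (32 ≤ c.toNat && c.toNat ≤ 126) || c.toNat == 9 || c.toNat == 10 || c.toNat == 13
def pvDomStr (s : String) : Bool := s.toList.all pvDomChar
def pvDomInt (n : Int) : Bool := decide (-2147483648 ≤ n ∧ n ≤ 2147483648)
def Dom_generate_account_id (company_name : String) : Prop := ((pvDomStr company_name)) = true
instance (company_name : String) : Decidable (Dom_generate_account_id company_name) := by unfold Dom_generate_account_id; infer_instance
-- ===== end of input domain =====

-- B replaces A's six whole-string replaces + filter + repeated "--"-replace loop by ONE pass that
-- tracks the last emitted character (objective: alternative single-pass decomposition).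

-- ===== PORT A =====
-- helpers needed by port A's termination proof: the result of slug.replace("--","-") and that it shrinks
def rep2 : List Char → List Char
  | [] => []
  | [c] => [c]
  | c :: d :: t => if c = '-' ∧ d = '-' then '-' :: rep2 t else c :: rep2 (d :: t)

theorem rep2_len_le (s : List Char) : (rep2 s).length ≤ s.length := by
  fun_induction rep2 s <;> simp_all <;> omega

theorem rep2_len_lt (s : List Char) (h : ['-', '-'] <:+: s) :
    (rep2 s).length < s.length := by
  fun_induction rep2 s with
  | case1 => simp at h
  | case2 c => have := h.length_le; simp at this
  | case3 c d t hcd ih =>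
      have := rep2_len_le t
      simp only [List.length_cons]
      omega
  | case4 c d t hcd ih =>
      have hinf : ['-', '-'] <:+: d :: t := by
        rcases (List.infix_cons_iff).mp h with hp | hi
        · rcases hp with ⟨u, hu⟩
          simp at hu
          exact absurd ⟨hu.1.symm, hu.2.1.symm⟩ hcd
        · exact hi
      have := ih hinf
      simp only [List.length_cons] at this ⊢
      omega

theorem replace_go_two (fuel : ℕ) : ∀ (s acc : List Char), s.length ≤ fuel →
    PySem.Chars.replace.go ['-', '-'] ['-'] fuel s acc = acc.reverse ++ rep2 s := by
  induction fuel with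
  | zero =>
      intro s acc hle
      have : s = [] := by cases s <;> simp_all
      subst this; simp [PySem.Chars.replace.go, rep2]
  | succ fuel ih =>
      intro s acc hle
      match s with
      | [] => simp [PySem.Chars.replace.go, rep2]
      | [c] =>
          have hpre : List.isPrefixOf ['-', '-'] [c] = false := by
            simp [List.isPrefixOf]
          simp only [PySem.Chars.replace.go, hpre, Bool.false_eq_true, if_false]
          rw [ih [] (c :: acc) (by simp)]
          simp [rep2]
      | c :: d :: t =>
          by_cases hcd : c = '-' ∧ d = '-'
          · obtain ⟨hc, hd⟩ := hcd; subst hc; subst hd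
            have hpre : List.isPrefixOf ['-', '-'] ('-' :: '-' :: t) = true := by
              simp [List.isPrefixOf]
            simp only [PySem.Chars.replace.go, hpre, if_true]
            rw [show List.drop (['-', '-'] : List Char).length ('-' :: '-' :: t) = t from rfl,
              show (['-'] : List Char).reverse ++ acc = '-' :: acc from rfl]
            rw [ih t ('-' :: acc) (by simp at hle ⊢; omega)]
            simp [rep2]
          · have hpre : List.isPrefixOf ['-', '-'] (c :: d :: t) = false := by
              rcases not_and_or.mp hcd with hc | hd
              · simp [List.isPrefixOf]; intro h; exact absurd h.symm hc
              · simp [List.isPrefixOf]; intro _ h; exact absurd h.symm hd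
            simp only [PySem.Chars.replace.go, hpre, Bool.false_eq_true, if_false]
            rw [ih (d :: t) (c :: acc) (by simp at hle ⊢; omega)]
            simp [rep2, hcd]

theorem replace_two (l : List Char) :
    PySem.Chars.replace l ['-', '-'] ['-'] = rep2 l := by
  have h := replace_go_two l.length l [] (le_refl _)
  simpa [PySem.Chars.replace] using h

theorem replace_two_toList (s : String) :
    (PySem.Str.replace s "--" "-").toList = rep2 s.toList := by
  have h2 : ("--" : String).toList = ['-', '-'] := by decide
  have h1 : ("-" : String).toList = ['-'] := by decide
  simp [PySem.Str.replace, h2, h1, replace_two]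

theorem collapse_dec (s : String) (h : PySem.Str.isIn "--" s = true) :
    (PySem.Str.replace s "--" "-").toList.length < s.toList.length := by
  have hinf : ['-', '-'] <:+: s.toList := by
    have := (PySem.Str.isIn_iff_infix "--" s).mp h
    have h2 : ("--" : String).toList = ['-', '-'] := by decide
    rwa [h2] at this
  rw [replace_two_toList]
  exact rep2_len_lt _ hinf

-- while "--" in slug: slug = slug.replace("--", "-")
def collapseLoop (s : String) : String :=
  if h : PySem.Str.isIn "--" s = true then
    collapseLoop (PySem.Str.replace s "--" "-")
  else s
termination_by s.toList.length
decreasing_by exact collapse_dec s h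

def generate_account_id (company_name : String) : String :=
  let slug := PySem.Str.lower company_name
  let slug := [" ", "&", "/", "\\", ".", ","].foldl
    (fun sl ch => PySem.Str.replace sl ch "-") slug
  let slug := String.ofList (slug.toList.filter
    (fun c => PySem.Chars.isalnum c || c == '-'))
  let slug := collapseLoop slug
  PySem.Str.stripChars slug "-"

-- ===== PORT B =====
-- loop body of Source B: classify the char, drop it, or append it unless it repeats a dash
def bstep (acc : List Char) (c : Char) : List Char :=
  match (if (" &/\\.," : String).toList.contains c then some '-'
         else if PySem.Chars.isalnum c || c == '-' then some c
         else none) with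
  | none => acc
  | some d => if d == '-' && acc.head? == some '-' then acc else d :: acc

def generate_account_id_alt (company_name : String) : String :=
  let out := (PySem.Str.lower company_name).toList.foldl bstep []
  PySem.Str.stripChars (String.ofList out.reverse) "-"

-- ===== PRECONDITION & SPEC =====
def Spec_generate_account_id (company_name : String) (out : String) : Prop := out = generate_account_id_alt company_name
instance (company_name : String) (out : String) : Decidable (Spec_generate_account_id company_name out) := by unfold Spec_generate_account_id; infer_instance

-- ===== CLAIM (what is proved, stated in full; the proofs are below) =====
def Claim_equal_generate_account_id : Prop := ∀ (company_name : String), Dom_generate_account_id company_name → Spec_generate_account_id company_name (generate_account_id company_name)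

-- ===== LEMMAS AND PROOFS =====

-- the pointwise effect of the six sequential replaces
def subDash (c : Char) : Char :=
  if (" &/\\.," : String).toList.contains c then '-' else c

def keepCh (c : Char) : Bool := PySem.Chars.isalnum c || c == '-'

-- dash-squeezing normal form; b = "last emitted char was a dash"
def sqz (b : Bool) : List Char → List Char
  | [] => []
  | c :: t => if c = '-' then (if b then sqz true t else '-' :: sqz true t) else c :: sqz false t

def dashAppend (acc : List Char) (d : Char) : List Char :=
  if d == '-' && acc.head? == some '-' then acc else d :: acc

-- single-char replace is a map
theorem replace_go_one (a : Char) (fuel : ℕ) : ∀ (s acc : List Char), s.length ≤ fuel →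
    PySem.Chars.replace.go [a] ['-'] fuel s acc
      = acc.reverse ++ s.map (fun c => if c = a then '-' else c) := by
  induction fuel with
  | zero =>
      intro s acc hle
      have : s = [] := by cases s <;> simp_all
      subst this; simp [PySem.Chars.replace.go]
  | succ fuel ih =>
      intro s acc hle
      match s with
      | [] => simp [PySem.Chars.replace.go]
      | c :: t =>
          by_cases hc : a = c
          · subst hc
            have hpre : List.isPrefixOf [a] (a :: t) = true := by simp [List.isPrefixOf]
            simp only [PySem.Chars.replace.go, hpre, if_true]
            rw [show List.drop ([a] : List Char).length (a :: t) = t from rfl,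
              show (['-'] : List Char).reverse ++ acc = '-' :: acc from rfl]
            rw [ih t ('-' :: acc) (by simpa using hle)]
            simp
          · have hpre : List.isPrefixOf [a] (c :: t) = false := by
              simp [List.isPrefixOf]; exact hc
            simp only [PySem.Chars.replace.go, hpre, Bool.false_eq_true, if_false]
            rw [ih t (c :: acc) (by simpa using hle)]
            simp [Ne.symm hc]

theorem replace_one (l : List Char) (a : Char) :
    PySem.Chars.replace l [a] ['-'] = l.map (fun c => if c = a then '-' else c) := by
  have h := replace_go_one a l.length l [] (le_refl _)
  simpa [PySem.Chars.replace] using h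

-- the six replaces compose to subDash
theorem replace_str_one (l : List Char) (ch : String) (a : Char) (h : ch.toList = [a]) :
    PySem.Str.replace (String.ofList l) ch "-"
      = String.ofList (l.map (fun c => if c = a then '-' else c)) := by
  have hd : ("-" : String).toList = ['-'] := by decide
  simp only [PySem.Str.replace, String.toList_ofList, h, hd, replace_one]

theorem six_replaces (l : List Char) :
    [" ", "&", "/", "\\", ".", ","].foldl
      (fun sl ch => PySem.Str.replace sl ch "-") (String.ofList l)
      = String.ofList (l.map subDash) := by
  simp only [List.foldl_cons, List.foldl_nil]
  rw [replace_str_one l " " ' ' (by decide)]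
  rw [replace_str_one _ "&" '&' (by decide)]
  rw [replace_str_one _ "/" '/' (by decide)]
  rw [replace_str_one _ "\\" '\\' (by decide)]
  rw [replace_str_one _ "." '.' (by decide)]
  rw [replace_str_one _ "," ',' (by decide)]
  simp only [List.map_map]
  refine congrArg String.ofList (List.map_congr_left ?_)
  intro c _
  by_cases e1 : c = ' '; · subst e1; decide
  by_cases e2 : c = '&'; · subst e2; decide
  by_cases e3 : c = '/'; · subst e3; decide
  by_cases e4 : c = '\\'; · subst e4; decide
  by_cases e5 : c = '.'; · subst e5; decide
  by_cases e6 : c = ','; · subst e6; decide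
  simp [subDash, Function.comp, e1, e2, e3, e4, e5, e6]

-- squeezing is invariant under one replace("--","-") pass
theorem sq_rep2 (s : List Char) : ∀ b, sqz b (rep2 s) = sqz b s := by
  fun_induction rep2 s with
  | case1 => intro b; rfl
  | case2 c => intro b; rfl
  | case3 c d t hcd ih =>
      intro b
      obtain ⟨hc, hd⟩ := hcd; subst hc; subst hd
      cases b <;> simp [sqz, ih]
  | case4 c d t hcd ih =>
      intro b
      by_cases hc : c = '-'
      · subst hc; cases b <;> simp [sqz, ih]
      · simp [sqz, hc, ih]

-- a string with no "--" is already squeezed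
theorem sq_of_noadj : ∀ (s : List Char) (b : Bool),
    (b = true → s.head? ≠ some '-') → ¬ (['-', '-'] <:+: s) → sqz b s = s := by
  intro s
  induction s with
  | nil => intro b _ _; rfl
  | cons c t ih =>
      intro b hb hinf
      by_cases hc : c = '-'
      · subst hc
        have hbfalse : b = false := by
          cases b
          · rfl
          · exact absurd rfl (fun h => hb h rfl)
        subst hbfalse
        have htail : ∀ t', t = '-' :: t' → False := by
          intro t' ht; subst ht
          exact hinf ⟨[], t', by simp⟩
        have hhead : t.head? ≠ some '-' := by
          cases t with
          | nil => simp
          | cons x xs =>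
              simp only [List.head?_cons, ne_eq, Option.some.injEq]
              intro hx; exact htail xs (by rw [hx])
        have hnt : ¬ (['-', '-'] <:+: t) := fun h => hinf (List.infix_cons h)
        simp [sqz, ih true (fun _ => hhead) hnt]
      · have hnt : ¬ (['-', '-'] <:+: t) := fun h => hinf (List.infix_cons h)
        simp [sqz, hc, ih false (by simp) hnt]

-- A's while-loop computes the squeeze
theorem collapseLoop_eq (s : List Char) :
    collapseLoop (String.ofList s) = String.ofList (sqz false s) := by
  induction hn : s.length using Nat.strong_induction_on generalizing s with
  | _ n ih =>
    subst hn
    rw [collapseLoop]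
    by_cases h : PySem.Str.isIn "--" (String.ofList s) = true
    · rw [dif_pos h]
      have hinf : ['-', '-'] <:+: s := by
        have := (PySem.Str.isIn_iff_infix "--" (String.ofList s)).mp h
        have h2 : ("--" : String).toList = ['-', '-'] := by decide
        rw [h2, String.toList_ofList] at this
        exact this
      have hrw : PySem.Str.replace (String.ofList s) "--" "-" = String.ofList (rep2 s) := by
        have h2 : ("--" : String).toList = ['-', '-'] := by decide
        have h1 : ("-" : String).toList = ['-'] := by decide
        simp [PySem.Str.replace, h2, h1, replace_two]
      rw [hrw, ih (rep2 s).length (by simpa using rep2_len_lt s hinf) (rep2 s) rfl,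
        sq_rep2 s false]
    · rw [dif_neg h]
      have hninf : ¬ (['-', '-'] <:+: s) := by
        intro hinf
        apply h
        rw [PySem.Str.isIn_iff_infix]
        have h2 : ("--" : String).toList = ['-', '-'] := by decide
        rw [h2, String.toList_ofList]
        exact hinf
      rw [sq_of_noadj s false (by simp) hninf]

-- B's fold is the fold of dashAppend over the classified, filtered chars
theorem bstep_foldl (l : List Char) : ∀ acc,
    l.foldl bstep acc = ((l.map subDash).filter keepCh).foldl dashAppend acc := by
  induction l with
  | nil => intro acc; rfl
  | cons c t ih =>
      intro acc
      by_cases hm : (" &/\\.," : String).toList.contains c = true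
      · have hk : keepCh '-' = true := by decide
        simp only [List.foldl_cons, List.map_cons, subDash, hm, if_true,
          List.filter_cons, hk, bstep, List.foldl_cons]
        exact ih _
      · by_cases hkc : keepCh c = true
        · simp only [List.foldl_cons, List.map_cons, subDash, hm, Bool.false_eq_true,
            if_false, List.filter_cons, hkc, bstep, keepCh] at *
          simp only [hm, Bool.false_eq_true, if_false, hkc, if_true]
          rw [ih]
          rfl
        · simp only [List.foldl_cons, List.map_cons, subDash, hm, Bool.false_eq_true,
            if_false, List.filter_cons, hkc, bstep, keepCh] at *
          simp only [hm, Bool.false_eq_true, if_false, hkc, if_false]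
          exact ih acc

-- folding dashAppend is squeezing (onto the accumulator)
theorem foldl_dashAppend (x : List Char) : ∀ acc,
    x.foldl dashAppend acc = (sqz (acc.head? == some '-') x).reverse ++ acc := by
  induction x with
  | nil => intro acc; simp [sqz]
  | cons c t ih =>
      intro acc
      by_cases hc : c = '-'
      · subst hc
        by_cases hh : acc.head? == some '-'
        · have hda : dashAppend acc '-' = acc := by simp [dashAppend, hh]
          simp only [List.foldl_cons, hda, ih, sqz, if_pos rfl, hh, if_true]
        · have hda : dashAppend acc '-' = '-' :: acc := by
            simp only [dashAppend]
            rw [if_neg]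
            simp [hh]
          have hh' : (('-' :: acc).head? == some '-') = true := by simp
          simp only [List.foldl_cons, hda, ih, hh', sqz, if_pos rfl]
          simp [hh]
      · have hda : dashAppend acc c = c :: acc := by
          simp [dashAppend, hc]
        have hh' : ((c :: acc).head? == some '-') = false := by simp [hc]
        simp only [List.foldl_cons, hda, ih, hh', sqz, hc, if_false]
        simp

-- ===== VERDICT (by name: the statement is the Claim_ definition above) =====
theorem generate_account_id_spec : Claim_equal_generate_account_id := by
  intro cn _
  unfold Spec_generate_account_id generate_account_id generate_account_id_alt
  dsimp only []
  have hlow : PySem.Str.lower cn = String.ofList (PySem.Chars.lower cn.toList) := rfl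
  rw [hlow, six_replaces]
  set L := PySem.Chars.lower cn.toList with hL
  set F := (L.map subDash).filter keepCh with hF
  have hfilter : (String.ofList (L.map subDash)).toList.filter
      (fun c => PySem.Chars.isalnum c || c == '-') = F := by
    rw [hF, String.toList_ofList]; rfl
  rw [hfilter, collapseLoop_eq]
  have hB : (String.ofList (PySem.Chars.lower cn.toList)).toList.foldl bstep [] = (sqz false F).reverse := by
    rw [String.toList_ofList, ← hL, bstep_foldl, ← hF, foldl_dashAppend]
    simp
  rw [hB]
  simp
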